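-- pv_equiv track=rewrite | github.com/shahpriyesh/PracticeCode | HashMapQuestions/GroupsOfSpecialEquivalentStrings.py | groupOfSpecialEquivalentStrings
-- ===== SOURCE A (Python) =====
-- from collections import defaultdict
--
-- def groupOfSpecialEquivalentStrings(A):
--     hmap = defaultdict(list)
--     for s in A:
--         odd = []
--         even = []
--         for i, c in enumerate(s):
--             if i & 1:
--                 odd.append(c)
--             else:
--                 even.append(c)
--
--         odd = ''.join(sorted(list(set(odd))))
--         even = ''.join(sorted(list(set(even))))
--         key = odd + even
--         hmap[key].append(s)
--
--     biggest = None
--     biggest_len = 0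
--     for v in hmap.values():
--         if len(v) > biggest_len:
--             biggest_len = len(v)
--             biggest = v
--
--     return biggest_len
-- ===== SOURCE B (Python) =====
-- def _sig(s):
--     odd = {c for i, c in enumerate(s) if i & 1}
--     even = {c for i, c in enumerate(s) if not i & 1}
--     return ''.join(sorted(odd)) + ''.join(sorted(even))
--
--
-- def groupOfSpecialEquivalentStrings(A):
--     sigs = sorted(_sig(s) for s in A)
--     best = run = 0
--     prev = None
--     for k in sigs:
--         run = run + 1 if k == prev else 1
--         prev = k
--         if run > best:
--             best = run
--     return best
-- ===== Notes on version B (the rewrite author's own statement) =====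
-- stated objective: alternative
-- what changed: Replaces the defaultdict grouping plus a values scan by a flat list of signatures that is sorted once and swept with a run-length counter tracking the longest run of equal consecutive signatures.
import Mathlib
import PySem

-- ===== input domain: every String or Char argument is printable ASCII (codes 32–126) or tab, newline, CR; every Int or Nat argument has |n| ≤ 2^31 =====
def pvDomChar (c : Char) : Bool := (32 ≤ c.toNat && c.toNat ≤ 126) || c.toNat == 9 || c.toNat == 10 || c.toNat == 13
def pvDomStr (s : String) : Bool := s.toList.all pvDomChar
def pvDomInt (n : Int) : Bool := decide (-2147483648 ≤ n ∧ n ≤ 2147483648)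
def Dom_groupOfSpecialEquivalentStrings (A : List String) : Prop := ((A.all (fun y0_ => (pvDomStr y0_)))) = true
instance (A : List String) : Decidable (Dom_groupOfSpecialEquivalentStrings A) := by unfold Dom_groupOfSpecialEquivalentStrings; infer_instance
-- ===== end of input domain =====

-- B replaces A's defaultdict grouping by sorting the flat list of signatures once and scanning it
-- for the longest run of equal consecutive signatures (objective: alternative algorithm, same result).

-- ===== PORT A =====
-- body of A's inner 'for i, c in enumerate(s)': append c to odd when i & 1 is truthy, else to even
def pvSplitStep (oe : List Char × List Char) (ic : Int × Char) : List Char × List Char :=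
  if PySem.Int.band ic.1 1 ≠ 0 then (oe.1 ++ [ic.2], oe.2) else (oe.1, oe.2 ++ [ic.2])

-- odd = ''.join(sorted(list(set(odd)))); even likewise; key = odd + even
-- (''.join of a list of single characters is the string of those characters)
def pvSigA (s : String) : String :=
  let oe := (PySem.List.enumerate s.toList 0).foldl pvSplitStep ([], [])
  let odd := PySem.List.sorted (PySem.Set.ofList oe.1) (fun c => c) false
  let even := PySem.List.sorted (PySem.Set.ofList oe.2) (fun c => c) false
  String.ofList (odd ++ even)

-- body of A's final loop: track (biggest, biggest_len)
def pvBestStep (acc : Option (List String) × Int) (v : List String) : Option (List String) × Int :=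
  if PySem.List.len v > acc.2 then (some v, PySem.List.len v) else acc

def groupOfSpecialEquivalentStrings (A : List String) : Int :=
  let hmap := A.foldl (fun d s => d.modify (pvSigA s) [] (fun v => v ++ [s])) PySem.Dict.empty
  let r := hmap.values.foldl pvBestStep (none, 0)
  r.2

-- ===== PORT B =====
-- odd/even are set comprehensions over enumerate(s); key = ''.join(sorted(odd)) + ''.join(sorted(even))
def pvSigAlt (s : String) : String :=
  let odd := PySem.Set.ofList
    (((PySem.List.enumerate s.toList 0).filter (fun ic => PySem.Int.band ic.1 1 != 0)).map (·.2))
  let even := PySem.Set.ofList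
    (((PySem.List.enumerate s.toList 0).filter (fun ic => PySem.Int.band ic.1 1 == 0)).map (·.2))
  String.ofList (PySem.List.sorted odd (fun c => c) false ++ PySem.List.sorted even (fun c => c) false)

-- body of B's loop: run = run + 1 if k == prev else 1; prev = k; best = max so far
def pvScanStep (st : Int × Int × Option String) (k : String) : Int × Int × Option String :=
  let run : Int := if some k = st.2.2 then st.2.1 + 1 else 1
  let best := if run > st.1 then run else st.1
  (best, run, some k)

def groupOfSpecialEquivalentStrings_alt (A : List String) : Int :=
  let sigs := PySem.List.sorted (A.map pvSigAlt) (fun x => x) false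
  let st := sigs.foldl pvScanStep (0, 0, none)
  st.1

-- ===== PRECONDITION & SPEC =====
def Spec_groupOfSpecialEquivalentStrings (A : List String) (out : Int) : Prop := out = groupOfSpecialEquivalentStrings_alt A
instance (A : List String) (out : Int) : Decidable (Spec_groupOfSpecialEquivalentStrings A out) := by unfold Spec_groupOfSpecialEquivalentStrings; infer_instance

-- ===== CLAIM (what is proved, stated in full; the proofs are below) =====
def Claim_equal_groupOfSpecialEquivalentStrings : Prop := ∀ (A : List String), Dom_groupOfSpecialEquivalentStrings A → Spec_groupOfSpecialEquivalentStrings A (groupOfSpecialEquivalentStrings A)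

-- ===== LEMMAS AND PROOFS =====

-- the multiset of group sizes, as Int, one per distinct signature (first-occurrence order)
def pvCounts (l : List String) : List Int := (PySem.Set.ofList l).map (fun k => (l.count k : Int))

-- A's parity-splitting loop is a pair of filters over enumerate(s)
theorem pv_split_eq (l : List (Int × Char)) (o e : List Char) :
    l.foldl pvSplitStep (o, e) =
      (o ++ (l.filter (fun ic => PySem.Int.band ic.1 1 != 0)).map (·.2),
       e ++ (l.filter (fun ic => PySem.Int.band ic.1 1 == 0)).map (·.2)) := by
  induction l generalizing o e with
  | nil => simp
  | cons x t ih =>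
    by_cases h : PySem.Int.band x.1 1 = 0 <;>
      simp [pvSplitStep, h, ih]

theorem pv_sig_eq (s : String) : pvSigA s = pvSigAlt s := by
  simp [pvSigA, pvSigAlt, pv_split_eq, bne]

theorem pv_best_proj (vs : List (List String)) (acc : Option (List String) × Int) :
    (vs.foldl pvBestStep acc).2 = vs.foldl (fun b v => max b (PySem.List.len v)) acc.2 := by
  induction vs generalizing acc with
  | nil => rfl
  | cons v t ih =>
    have h : (pvBestStep acc v).2 = max acc.2 (PySem.List.len v) := by
      simp only [pvBestStep]; split_ifs with h <;> omega
    simp only [List.foldl_cons, ih, h]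

-- A computes the maximum group size: foldl max over the per-signature counts
theorem pv_A_eq (A : List String) :
    groupOfSpecialEquivalentStrings A = (pvCounts (A.map pvSigA)).foldl max 0 := by
  unfold groupOfSpecialEquivalentStrings
  have hfm : A.foldl (fun d s => d.modify (pvSigA s) [] (fun v => v ++ [s])) PySem.Dict.empty
      = (A.map (fun s => (pvSigA s, s))).foldl
          (fun d p => d.modify p.1 [] (fun v => v ++ [p.2])) PySem.Dict.empty := by
    rw [List.foldl_map]
  set d := A.foldl (fun d s => d.modify (pvSigA s) [] (fun v => v ++ [s])) PySem.Dict.empty with hd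
  have hnd : d.keys.Nodup :=
    PySem.Dict.nodup_keys_foldl_modify_key A pvSigA [] (fun _ s v => v ++ [s]) _ (by simp)
  have hkeys : d.keys = PySem.Set.ofList (A.map pvSigA) := by
    rw [hd, PySem.Dict.keys_foldl_modify_key A pvSigA [] (fun _ s v => v ++ [s])]
    rfl
  have hget : ∀ c, d.getD c [] = ((A.map (fun s => (pvSigA s, s))).filter (fun p => p.1 == c)).map (·.2) := by
    intro c
    rw [hfm, PySem.Dict.getD_foldl_modify_append]
    simp
  have hlen : ∀ c, PySem.List.len (d.getD c []) = ((A.map pvSigA).count c : Int) := by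
    intro c
    rw [PySem.List.len_eq]
    rw [hget c, List.length_map, ← List.countP_eq_length_filter, List.countP_map,
      List.count_eq_countP, List.countP_map]
    rfl
  rw [pv_best_proj, PySem.Dict.values_eq_map_keys d hnd [], List.foldl_map, hkeys]
  simp only [hlen]
  rw [pvCounts, List.foldl_map]

-- scanning j more copies of k with prev = k
theorem pv_scan_replicate_cont (j : Nat) (k : String) (b i : Int) (hib : i ≤ b) :
    (List.replicate j k).foldl pvScanStep (b, i, some k) = (max b (i + j), i + j, some k) := by
  induction j generalizing b i with
  | zero => simp [max_eq_left hib]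
  | succ n ih =>
    have h1 : i + 1 ≤ max b (i + 1) := le_max_right _ _
    simp only [List.replicate_succ, List.foldl_cons]
    have hstep : pvScanStep (b, i, some k) k = (max b (i + 1), i + 1, some k) := by
      simp only [pvScanStep]; split_ifs with h <;> simp_all <;> omega
    rw [hstep, ih _ _ h1]
    simp only [Prod.mk.injEq]
    refine ⟨by push_cast; omega, by push_cast; omega, trivial⟩

theorem pv_scan_replicate (m : Nat) (hm : 0 < m) (k : String) (b r : Int) (p : Option String)
    (hp : p ≠ some k) :
    (List.replicate m k).foldl pvScanStep (b, r, p) = (max b (m : Int), (m : Int), some k) := by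
  cases m with
  | zero => omega
  | succ n =>
    simp only [List.replicate_succ, List.foldl_cons]
    have hstep : pvScanStep (b, r, p) k = (max b 1, 1, some k) := by
      simp only [pvScanStep]
      have : ¬ some k = p := fun h => hp h.symm
      split_ifs with h1 <;> simp_all <;> omega
    rw [hstep, pv_scan_replicate_cont _ _ _ _ (le_max_right _ _)]
    simp only [Prod.mk.injEq]
    refine ⟨by push_cast; omega, by push_cast; omega, trivial⟩

-- set(xs) helper facts for the block decomposition of a sorted list
theorem pv_add_mem {s : List String} {k : String} (h : k ∈ s) (x : String) (hx : x = k) :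
    PySem.Set.add s x = s := by
  subst hx; simp [PySem.Set.add, PySem.Set.contains, h]

theorem pv_foldl_add_replicate (j : Nat) (s : List String) (k : String) (h : k ∈ s) :
    (List.replicate j k).foldl PySem.Set.add s = s := by
  induction j with
  | zero => rfl
  | succ n ih => simp only [List.replicate_succ, List.foldl_cons, pv_add_mem h k rfl, ih]

theorem pv_add_cons_ne (s : List String) (k y : String) (hy : y ≠ k) :
    PySem.Set.add (k :: s) y = k :: PySem.Set.add s y := by
  have hc : ((k :: s).contains y) = s.contains y := by
    simp [hy]
  simp only [PySem.Set.add, PySem.Set.contains, hc]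
  split <;> simp

theorem pv_update_cons_ne (xs : List String) (s : List String) (k : String)
    (h : ∀ x ∈ xs, x ≠ k) :
    xs.foldl PySem.Set.add (k :: s) = k :: xs.foldl PySem.Set.add s := by
  induction xs generalizing s with
  | nil => rfl
  | cons y ys ih =>
    simp only [List.foldl_cons, pv_add_cons_ne s k y (h y (by simp))]
    exact ih _ (fun x hx => h x (by simp [hx]))

-- the run-length scan over a sorted list computes foldl max over the per-signature counts
theorem pv_scan_sorted (n : Nat) : ∀ (l : List String), l.length ≤ n →
    l.Pairwise (· ≤ ·) → ∀ (b r : Int) (p : Option String),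
    (∀ x, l.head? = some x → p ≠ some x) →
    (l.foldl pvScanStep (b, r, p)).1 = (pvCounts l).foldl max b := by
  induction n with
  | zero =>
    intro l hn _ b r p _
    have : l = [] := List.length_eq_zero_iff.mp (by omega)
    subst this; simp [pvCounts]
  | succ n ih =>
    intro l hn hs b r p hp
    match l with
    | [] => simp [pvCounts]
    | k :: t =>
      have htw : t.takeWhile (fun x => x == k)
          = List.replicate (t.takeWhile (fun x => x == k)).length k :=
        List.eq_replicate_length.mpr (fun x hx => by simpa using List.mem_takeWhile_imp hx)
      set m := (t.takeWhile (fun x => x == k)).length with hm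
      have hsplit : k :: t = List.replicate (m + 1) k ++ t.dropWhile (fun x => x == k) := by
        rw [List.replicate_succ, List.cons_append, ← htw, List.takeWhile_append_dropWhile]
      have hrs : (t.dropWhile (fun x => x == k)).Sublist t := List.dropWhile_sublist _
      have hkt : ∀ x ∈ t, k ≤ x := (List.pairwise_cons.mp hs).1
      have hrestpw : (t.dropWhile (fun x => x == k)).Pairwise (· ≤ ·) :=
        (List.pairwise_cons.mp hs).2.sublist hrs
      have hknr : k ∉ t.dropWhile (fun x => x == k) := by
        intro hk
        cases hd : t.dropWhile (fun x => x == k) with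
        | nil => rw [hd] at hk; simp at hk
        | cons y ys =>
          have hne : t.dropWhile (fun x => x == k) ≠ [] := by rw [hd]; simp
          have h2 : (fun x => x == k) ((t.dropWhile (fun x => x == k)).head hne) = false :=
            List.head_dropWhile_not _ hne
          simp only [hd, List.head_cons] at h2
          have hyne : y ≠ k := by simpa using h2
          rw [hd] at hk hrestpw hrs
          rcases List.mem_cons.mp hk with h | h
          · exact hyne h.symm
          · exact hyne (le_antisymm ((List.pairwise_cons.mp hrestpw).1 k h)
              (hkt y (hrs.mem (by simp))))
      have hxner : ∀ x ∈ t.dropWhile (fun x => x == k), x ≠ k :=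
        fun x hx hxk => hknr (hxk ▸ hx)
      have hcountk : (k :: t).count k = m + 1 := by
        rw [hsplit, List.count_append, List.count_replicate_self,
          List.count_eq_zero_of_not_mem hknr]
      have hcountx : ∀ x ∈ t.dropWhile (fun x => x == k),
          (k :: t).count x = (t.dropWhile (fun x => x == k)).count x := by
        intro x hx
        rw [hsplit, List.count_append, List.count_replicate,
          if_neg (by simpa using Ne.symm (hxner x hx))]
        omega
      have hsets : PySem.Set.ofList (k :: t)
          = k :: PySem.Set.ofList (t.dropWhile (fun x => x == k)) := by
        show (k :: t).foldl PySem.Set.add []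
          = k :: (t.dropWhile (fun x => x == k)).foldl PySem.Set.add []
        rw [hsplit, List.replicate_succ, List.cons_append, List.foldl_cons, List.foldl_append]
        have h0 : PySem.Set.add ([] : List String) k = [k] := by
          simp [PySem.Set.add, PySem.Set.contains]
        rw [h0, pv_foldl_add_replicate m [k] k (by simp)]
        exact pv_update_cons_ne _ [] k hxner
      have hpc : pvCounts (k :: t)
          = ((m + 1 : Nat) : Int) :: pvCounts (t.dropWhile (fun x => x == k)) := by
        unfold pvCounts
        rw [hsets, List.map_cons, hcountk]
        congr 1
        exact List.map_congr_left fun x hx => by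
          rw [hcountx x ((PySem.Set.mem_ofList _ x).mp hx)]
      have hlen : (t.dropWhile (fun x => x == k)).length ≤ n := by
        have h := congrArg List.length hsplit
        simp at h hn
        omega
      conv_lhs => rw [hsplit]
      rw [List.foldl_append, pv_scan_replicate (m + 1) (by omega) k b r p (hp k rfl)]
      rw [ih _ hlen hrestpw _ _ _ (fun x hx hkx => by
        have hxm : x ∈ t.dropWhile (fun x => x == k) := List.mem_of_mem_head? hx
        exact hxner x hxm (by injection hkx with h; exact h.symm))]
      rw [hpc, List.foldl_cons]

-- foldl max over the counts is invariant under sorting the list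
theorem pv_counts_sorted (l : List String) (b : Int) :
    (pvCounts (PySem.List.sorted l (fun x => x) false)).foldl max b = (pvCounts l).foldl max b := by
  have hp : (PySem.List.sorted l (fun x => x) false).Perm l := PySem.List.sorted_perm l _ false
  have hc : (fun k => (((PySem.List.sorted l (fun x => x) false).count k : Nat) : Int))
      = fun k => ((l.count k : Nat) : Int) := funext fun k => by rw [hp.count_eq]
  have hsetp : (PySem.Set.ofList (PySem.List.sorted l (fun x => x) false)).Perm (PySem.Set.ofList l) :=
    (List.perm_ext_iff_of_nodup (PySem.Set.nodup_ofList _) (PySem.Set.nodup_ofList _)).mpr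
      (fun x => by rw [PySem.Set.mem_ofList, PySem.Set.mem_ofList, hp.mem_iff])
  unfold pvCounts
  rw [hc]
  exact (hsetp.map _).foldl_eq b

-- ===== VERDICT (by name: the statement is the Claim_ definition above) =====
theorem groupOfSpecialEquivalentStrings_spec : Claim_equal_groupOfSpecialEquivalentStrings := by
  intro A _
  unfold Spec_groupOfSpecialEquivalentStrings
  have hmap : A.map pvSigAlt = A.map pvSigA := by
    simp [List.map_congr_left fun s _ => (pv_sig_eq s).symm]
  rw [pv_A_eq, groupOfSpecialEquivalentStrings_alt, hmap]
  rw [pv_scan_sorted (PySem.List.sorted (A.map pvSigA) (fun x => x) false).length _ le_rfl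
    (PySem.List.sorted_pairwise _ _) 0 0 none (by intro x _ h; cases h)]
  exact (pv_counts_sorted _ _).symm
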